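-- pv_equiv track=rewrite | github.com/Andrew-Cutlip/Rubix-Race-Research | solution.py | row_col_goal_states
-- ===== SOURCE A (Python) =====
-- def row_col_goal_states(n):
--     goal_states = []
--     for layer in range(n-2):
--         for i in range(n - layer):
--             goal_states.append(set([n * layer + i + 1]))
--             if len(goal_states) > 1:
--                 goal_states[-1] = goal_states[-1].union(goal_states[-2])
--         for i in range(n - layer - 1):
--             goal_states.append(set([n+1 + i * (n)]))
--             goal_states[-1] = goal_states[-1].union(goal_states[-2])
--     goal_states.append(set(range(1, n*n)))
--     return goal_states
-- ===== SOURCE B (Python) =====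
-- def row_col_goal_states(n):
--     # Recurse over layers, threading the accumulated set; each layer's values
--     # are two closed-form arithmetic ranges (rows then columns).
--     def go(layer, acc):
--         if layer >= n - 2:
--             return [set(range(1, n * n))]
--         out = []
--         for v in [*range(n * layer + 1, n * (layer + 1) - layer + 1),
--                   *range(n + 1, n + 1 + (n - layer - 1) * n, n)]:
--             acc = {v} | acc
--             out.append(acc)
--         return out + go(layer + 1, acc)
--     return go(0, set())
-- ===== Notes on version B (the rewrite author's own statement) =====
-- stated objective: alternative
-- what changed: B replaces A's single iterative pass of nested index loops that append singleton sets and then mutate the last list element in place (with a guard on the first append) by a recursion over layers that threads the accumulated set explicitly, derives each layer's values from two closed-form arithmetic ranges instead of per-index formulas, and places the final range set in the recursion's base case.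
import Mathlib
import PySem

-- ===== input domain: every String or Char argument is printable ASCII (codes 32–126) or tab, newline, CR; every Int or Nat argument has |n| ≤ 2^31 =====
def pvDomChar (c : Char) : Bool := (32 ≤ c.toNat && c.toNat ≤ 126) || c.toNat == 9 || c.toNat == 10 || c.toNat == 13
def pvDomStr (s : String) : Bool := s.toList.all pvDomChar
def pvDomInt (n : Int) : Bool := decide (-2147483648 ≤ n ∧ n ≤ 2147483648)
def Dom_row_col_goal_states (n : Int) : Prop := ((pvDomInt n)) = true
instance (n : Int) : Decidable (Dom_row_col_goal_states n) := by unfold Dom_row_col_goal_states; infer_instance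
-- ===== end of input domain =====

-- B recurses over layers with an accumulator set, generating each layer's values as two
-- closed-form arithmetic ranges, instead of A's nested index loops that mutate the last
-- list element in place behind a first-append guard (objective: alternative).

-- ===== PORT A =====
def row_col_goal_states (n : Int) : List (List Int) :=
  let goal_states : List (List Int) := []
  let goal_states := (PySem.List.pyRange 0 (n - 2) 1).foldl (fun goal_states layer =>
    let goal_states := (PySem.List.pyRange 0 (n - layer) 1).foldl (fun goal_states i =>
      let goal_states := goal_states ++ [PySem.Set.ofList [n * layer + i + 1]]
      if goal_states.length > 1 then
        PySem.List.pySetD goal_states (-1)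
          (PySem.Set.union (PySem.List.pyGetD goal_states (-1) [])
            (PySem.List.pyGetD goal_states (-2) []))
      else goal_states) goal_states
    (PySem.List.pyRange 0 (n - layer - 1) 1).foldl (fun goal_states i =>
      let goal_states := goal_states ++ [PySem.Set.ofList [n + 1 + i * n]]
      PySem.List.pySetD goal_states (-1)
        (PySem.Set.union (PySem.List.pyGetD goal_states (-1) [])
          (PySem.List.pyGetD goal_states (-2) []))) goal_states) goal_states
  goal_states ++ [PySem.Set.ofList (PySem.List.pyRange 1 (n * n) 1)]

-- ===== PORT B =====
-- B-side helper: the body of Source B's inner 'for v in …: acc = {v} | acc; out.append(acc)'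
def pvBstep (p : List (List Int) × List Int) (v : Int) : List (List Int) × List Int :=
  let acc := PySem.Set.union (PySem.Set.ofList [v]) p.2
  (p.1 ++ [acc], acc)

-- Source B's recursive 'go(layer, acc)'
def pvGo (n layer : Int) (acc : List Int) : List (List Int) :=
  if _h : n - 2 ≤ layer then [PySem.Set.ofList (PySem.List.pyRange 1 (n * n) 1)]
  else
    let p := (PySem.List.pyRange (n * layer + 1) (n * (layer + 1) - layer + 1) 1
              ++ PySem.List.pyRange (n + 1) (n + 1 + (n - layer - 1) * n) n).foldl
             pvBstep ([], acc)
    p.1 ++ pvGo n (layer + 1) p.2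
termination_by (n - 2 - layer).toNat
decreasing_by omega

def row_col_goal_states_alt (n : Int) : List (List Int) := pvGo n 0 []

-- ===== PRECONDITION & SPEC =====
def Spec_row_col_goal_states (n : Int) (out : List (List Int)) : Prop := out = row_col_goal_states_alt n
instance (n : Int) (out : List (List Int)) : Decidable (Spec_row_col_goal_states n out) := by unfold Spec_row_col_goal_states; infer_instance

-- ===== CLAIM (what is proved, stated in full; the proofs are below) =====
def Claim_equal_row_col_goal_states : Prop := ∀ (n : Int), Dom_row_col_goal_states n → Spec_row_col_goal_states n (row_col_goal_states n)

-- ===== LEMMAS AND PROOFS =====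

-- A's uniform append-then-union step, in closed form over the previous list.
def pvAstep (gs : List (List Int)) (v : Int) : List (List Int) :=
  gs ++ [PySem.Set.union (PySem.Set.ofList [v]) (gs.getLastD [])]

lemma pv_getD_neg_two (gs : List (List Int)) (x d : List Int) :
    PySem.List.pyGetD (gs ++ [x]) (-2) d = gs.getLastD d := by
  rcases List.eq_nil_or_concat gs with rfl | ⟨ys, y, hy⟩
  · simp [PySem.List.pyGetD, PySem.List.pyGet?, PySem.List.pyIdx?]
  · rw [List.concat_eq_append] at hy
    subst hy
    have h2 : 2 ≤ (ys ++ [y] ++ [x]).length := by simp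
    rw [show ((-2 : Int)) = -((2:Nat) : Int) by norm_num,
        PySem.List.pyGetD_neg_natCast _ _ _ (by omega) h2]
    simp

lemma pv_setD_last (gs : List (List Int)) (v : Int) :
    PySem.List.pySetD (gs ++ [PySem.Set.ofList [v]]) (-1)
      (PySem.Set.union (PySem.List.pyGetD (gs ++ [PySem.Set.ofList [v]]) (-1) [])
        (PySem.List.pyGetD (gs ++ [PySem.Set.ofList [v]]) (-2) []))
    = pvAstep gs v := by
  rw [PySem.List.pyGetD_neg_one_append_singleton, pv_getD_neg_two]
  simp [pvAstep, PySem.List.pySetD, PySem.List.pySet?, PySem.List.pyIdx?]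

-- the row step once pySetD has already been rewritten inside the if
lemma pv_row_step' (gs : List (List Int)) (v : Int) :
    (if (gs ++ [PySem.Set.ofList [v]]).length > 1 then pvAstep gs v
      else gs ++ [PySem.Set.ofList [v]]) = pvAstep gs v := by
  rcases List.eq_nil_or_concat gs with rfl | ⟨ys, y, hy⟩
  · simp [pvAstep, PySem.Set.union, PySem.Set.ofList, PySem.Set.add]
  · rw [List.concat_eq_append] at hy
    subst hy
    rw [if_pos (by simp)]

-- affine images of range(0, m) are ranges
lemma pv_map_add (c m : Int) :
    (PySem.List.pyRange 0 m 1).map (fun i => c + i) = PySem.List.pyRange c (c + m) 1 := by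
  rw [PySem.List.pyRange_one 0 m, PySem.List.pyRange_one c (c + m)]
  simp [List.map_map, Function.comp]

lemma pv_map_mul_add (c s m : Int) (hs : 0 < s) :
    (PySem.List.pyRange 0 m 1).map (fun i => c + i * s) = PySem.List.pyRange c (c + m * s) s := by
  rw [PySem.List.pyRange_one 0 m, PySem.List.pyRange_of_pos c (c + m * s) hs]
  rcases (by omega : m ≤ 0 ∨ 0 < m) with hm | hm
  · rw [if_neg (by nlinarith)]
    simp [Int.toNat_of_nonpos hm]
  · rw [if_pos (by nlinarith)]
    have hdiv : (c + m * s - c + s - 1) / s = m := by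
      rw [show c + m * s - c + s - 1 = (s - 1) + m * s by ring,
          Int.add_mul_ediv_right _ _ (by omega)]
      have h0 : (s - 1) / s = 0 := Int.ediv_eq_zero_of_lt (by omega) (by omega)
      omega
    rw [hdiv]
    simp [List.map_map, Function.comp, mul_comm]

-- one layer of A's loop, as a fold of pvAstep over that layer's two value ranges
lemma pv_layer (n layer : Int) (h0 : 0 ≤ layer) (h3 : layer < n - 2) (gs : List (List Int)) :
    (PySem.List.pyRange 0 (n - layer - 1) 1).foldl (fun gs i => pvAstep gs (n + 1 + i * n))
      ((PySem.List.pyRange 0 (n - layer) 1).foldl (fun gs i => pvAstep gs (n * layer + i + 1)) gs)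
    = (PySem.List.pyRange (n * layer + 1) (n * (layer + 1) - layer + 1) 1
        ++ PySem.List.pyRange (n + 1) (n + 1 + (n - layer - 1) * n) n).foldl pvAstep gs := by
  rw [List.foldl_append,
      ← List.foldl_map (f := fun i : Int => n * layer + i + 1) (g := pvAstep),
      ← List.foldl_map (f := fun i : Int => n + 1 + i * n) (g := pvAstep)]
  rw [show (fun i : Int => n * layer + i + 1) = (fun i : Int => (n * layer + 1) + i) from
        funext (fun i => by ring), pv_map_add]
  rw [show (fun i : Int => n + 1 + i * n) = (fun i : Int => (n + 1) + i * n) from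
        funext (fun i => by ring), pv_map_mul_add _ _ _ (by omega)]
  rw [show n * layer + 1 + (n - layer) = n * (layer + 1) - layer + 1 by ring]

lemma pv_foldl_astep_flatMap (L : List Int) (f : Int → List Int) :
    ∀ (gs : List (List Int)),
    (L.flatMap f).foldl pvAstep gs = L.foldl (fun gs layer => (f layer).foldl pvAstep gs) gs := by
  induction L with
  | nil => intro gs; rfl
  | cons a L ih => intro gs; simp [List.foldl_append, ih]

-- the starting output list of a pvBstep sweep factors out
lemma pv_bstep_factor (vs : List Int) : ∀ (out : List (List Int)) (acc : List Int),
    vs.foldl pvBstep (out, acc)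
      = (out ++ (vs.foldl pvBstep ([], acc)).1, (vs.foldl pvBstep ([], acc)).2) := by
  induction vs with
  | nil => intro out acc; simp
  | cons v vs ih =>
    intro out acc
    rw [List.foldl_cons, List.foldl_cons,
        show pvBstep (out, acc) v
           = (out ++ [PySem.Set.union (PySem.Set.ofList [v]) acc],
              PySem.Set.union (PySem.Set.ofList [v]) acc) from rfl,
        show pvBstep ([], acc) v
           = ([PySem.Set.union (PySem.Set.ofList [v]) acc],
              PySem.Set.union (PySem.Set.ofList [v]) acc) from rfl,
        ih (out ++ _) _, ih [PySem.Set.union (PySem.Set.ofList [v]) acc] _]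
    simp

-- a pvBstep sweep carrying the last element separately computes A's pvAstep fold
lemma pv_scan_eq (vs : List Int) : ∀ (gs : List (List Int)),
    (vs.foldl pvBstep (gs, gs.getLastD [])).1 = vs.foldl pvAstep gs := by
  induction vs with
  | nil => intro gs; rfl
  | cons v vs ih =>
    intro gs
    rw [List.foldl_cons, List.foldl_cons,
        show pvBstep (gs, gs.getLastD []) v
           = (pvAstep gs v, (pvAstep gs v).getLastD []) from by simp [pvBstep, pvAstep]]
    exact ih (pvAstep gs v)

-- Source B's go(layer, acc) is the pvBstep sweep over the remaining layers' flattened values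
lemma pv_go_eq (n : Int) (f : Int → List Int)
    (hf : ∀ layer, f layer
        = PySem.List.pyRange (n * layer + 1) (n * (layer + 1) - layer + 1) 1
          ++ PySem.List.pyRange (n + 1) (n + 1 + (n - layer - 1) * n) n) :
    ∀ (k : Nat) (layer : Int) (acc : List Int), (n - 2 - layer).toNat = k →
    pvGo n layer acc
      = (((PySem.List.pyRange layer (n - 2) 1).flatMap f).foldl pvBstep ([], acc)).1
        ++ [PySem.Set.ofList (PySem.List.pyRange 1 (n * n) 1)] := by
  intro k
  induction k with
  | zero =>
    intro layer acc hk
    rw [pvGo, dif_pos (by omega),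
        PySem.List.pyRange_one_eq_nil (a := layer) (b := n - 2) (by omega)]
    simp
  | succ k ih =>
    intro layer acc hk
    rw [PySem.List.pyRange_one_cons (a := layer) (b := n - 2) (by omega),
        List.flatMap_cons, List.foldl_append,
        pv_bstep_factor ((PySem.List.pyRange (layer + 1) (n - 2) 1).flatMap f),
        List.append_assoc,
        ← ih (layer + 1) ((f layer).foldl pvBstep ([], acc)).2 (by omega),
        hf layer]
    rw [pvGo, dif_neg (by omega)]

-- ===== VERDICT (by name: the statement is the Claim_ definition above) =====
theorem row_col_goal_states_spec : Claim_equal_row_col_goal_states := by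
  intro n _
  unfold Spec_row_col_goal_states row_col_goal_states row_col_goal_states_alt
  simp only [pv_setD_last, pv_row_step']
  rw [PySem.List.foldl_congr_mem (PySem.List.pyRange 0 (n - 2) 1) _
      (fun gs layer =>
        (PySem.List.pyRange (n * layer + 1) (n * (layer + 1) - layer + 1) 1
          ++ PySem.List.pyRange (n + 1) (n + 1 + (n - layer - 1) * n) n).foldl pvAstep gs)
      []
      (fun gs layer hmem => by
        have hm := (PySem.List.mem_pyRange_one.mp hmem)
        exact pv_layer n layer hm.1 hm.2 gs)]
  rw [← pv_foldl_astep_flatMap, ← pv_scan_eq _ []]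
  rw [pv_go_eq n
        (fun layer => PySem.List.pyRange (n * layer + 1) (n * (layer + 1) - layer + 1) 1
          ++ PySem.List.pyRange (n + 1) (n + 1 + (n - layer - 1) * n) n)
        (fun _ => rfl) (n - 2 - 0).toNat 0 [] rfl]
  rfl
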